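-- pv_equiv track=rewrite | github.com/maxecoulter/BaRT-2 | BaRT_2_filter_binomial.py | unique_values_in_dict_sets
-- ===== SOURCE A (Python) =====
-- def unique_values_in_dict_sets(inputdict):#For each value in set per key in dictionary, find out if that value is unique to that key. if so add value to outputdictionary
-- 	outputdict = {}
-- 	for sample in inputdict.keys():
-- 		outputdict[sample] = set()
-- 		for gene in inputdict[sample]:
-- 			notunique = False
-- 			for sample1 in inputdict.keys():
-- 				if sample1 == sample:
-- 					pass
-- 				else:
-- 					if gene in inputdict[sample1]:
-- 						notunique = True
-- 					else:
-- 						pass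
-- 			if notunique == False:
-- 				outputdict[sample].add(gene)
-- 			else:
-- 				pass
-- 	return outputdict
-- ===== SOURCE B (Python) =====
-- def unique_values_in_dict_sets(inputdict):
--     # One counting pass over all sets, then one filtering pass: a gene is
--     # unique to its sample iff it occurs in exactly one sample's set.
--     count = {}
--     for genes in inputdict.values():
--         for g in genes:
--             count[g] = count.get(g, 0) + 1
--     return {sample: {g for g in genes if count[g] == 1}
--             for sample, genes in inputdict.items()}
-- ===== Notes on version B (the rewrite author's own statement) =====
-- stated objective: faster
-- what changed: Replaces the triple-nested scan (for every gene of every sample, rescan every other sample's set) by one global occurrence counter built in a single pass, then a single filtering pass keeping genes with count 1.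
import Mathlib
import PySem

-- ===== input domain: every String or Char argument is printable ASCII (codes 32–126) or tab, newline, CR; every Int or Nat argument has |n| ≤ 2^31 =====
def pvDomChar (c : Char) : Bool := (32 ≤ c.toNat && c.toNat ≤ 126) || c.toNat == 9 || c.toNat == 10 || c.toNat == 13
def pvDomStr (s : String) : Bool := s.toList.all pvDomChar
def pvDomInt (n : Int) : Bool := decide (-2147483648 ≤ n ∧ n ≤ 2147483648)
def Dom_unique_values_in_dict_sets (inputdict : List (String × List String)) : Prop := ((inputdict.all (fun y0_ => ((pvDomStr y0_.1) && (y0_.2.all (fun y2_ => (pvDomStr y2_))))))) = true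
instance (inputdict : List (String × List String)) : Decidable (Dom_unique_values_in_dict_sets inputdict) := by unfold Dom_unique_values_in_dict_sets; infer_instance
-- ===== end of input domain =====

-- B replaces A's triple-nested membership scan by a single global occurrence
-- counter plus one filtering pass (return-value equivalence; neither mutates its argument).


-- ===== PORT A =====
-- inputdict[k] on the association list (keys are unique: a Python dict)
def pvLookup (d : List (String × List String)) (k : String) : List String :=
  match d with
  | [] => []
  | (k', v) :: rest => if k' == k then v else pvLookup rest k

def unique_values_in_dict_sets (inputdict : List (String × List String)) : List (String × List String) :=
  inputdict.foldl (fun outputdict p =>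
    let sample := p.1
    let row := (pvLookup inputdict sample).foldl (fun acc gene =>
      let notunique := inputdict.foldl (fun b q =>
        if q.1 == sample then b
        else if (pvLookup inputdict q.1).contains gene then true else b) false
      if notunique == false then PySem.Set.add acc gene else acc) PySem.Set.empty
    outputdict ++ [(sample, row)]) []

-- ===== PORT B =====
def unique_values_in_dict_sets_alt (inputdict : List (String × List String)) : List (String × List String) :=
  let count : PySem.Dict String Int :=
    inputdict.foldl (fun d p => p.2.foldl (fun d g => d.insert g (d.getD g 0 + 1)) d) PySem.Dict.empty
  inputdict.map (fun p => (p.1, PySem.Set.ofList (p.2.filter (fun g => count.getD g 0 == 1))))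

-- ===== PRECONDITION & SPEC =====
-- Pre_ states the representation invariants of A's Python argument type (dict keys are
-- distinct; each value is a set, so its element list is duplicate-free): every Python
-- input satisfies it, so no input A accepts is excluded.
def Pre_unique_values_in_dict_sets (inputdict : List (String × List String)) : Prop :=
  (inputdict.map Prod.fst).Nodup ∧ ∀ p ∈ inputdict, p.2.Nodup
instance (inputdict : List (String × List String)) : Decidable (Pre_unique_values_in_dict_sets inputdict) := by
  unfold Pre_unique_values_in_dict_sets; infer_instance
def pvWitness_unique_values_in_dict_sets : (List (String × List String)) :=
  [("s1", ["g1", "g2"]), ("s2", ["g2", "g3"])]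
def Spec_unique_values_in_dict_sets (inputdict : List (String × List String)) (out : List (String × List String)) : Prop := out = unique_values_in_dict_sets_alt inputdict
instance (inputdict : List (String × List String)) (out : List (String × List String)) : Decidable (Spec_unique_values_in_dict_sets inputdict out) := by unfold Spec_unique_values_in_dict_sets; infer_instance

-- ===== CLAIM (what is proved, stated in full; the proofs are below) =====
def Claim_equal_unique_values_in_dict_sets : Prop := ∀ (inputdict : List (String × List String)), Dom_unique_values_in_dict_sets inputdict → Pre_unique_values_in_dict_sets inputdict → Spec_unique_values_in_dict_sets inputdict (unique_values_in_dict_sets inputdict)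

-- ===== LEMMAS AND PROOFS =====

-- looking up a pair's own key returns its value when keys are unique
theorem pvLookup_self (d : List (String × List String)) (p : String × List String)
    (hnd : (d.map Prod.fst).Nodup) (hp : p ∈ d) : pvLookup d p.1 = p.2 := by
  induction d with
  | nil => cases hp
  | cons q rest ih =>
    obtain ⟨q1, q2⟩ := q
    simp only [List.map_cons, List.nodup_cons] at hnd
    rcases List.mem_cons.mp hp with h | h
    · subst h; simp [pvLookup]
    · have hne : q1 ≠ p.1 := fun he => hnd.1 (he ▸ List.mem_map_of_mem (f := Prod.fst) h)
      simp [pvLookup, hne, ih hnd.2 h]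

-- the counter's final value at a gene is its total number of occurrences
theorem count_getD (l : List (String × List String)) (d : PySem.Dict String Int) (g : String) :
    (l.foldl (fun d p => p.2.foldl (fun d g => d.insert g (d.getD g 0 + 1)) d) d).getD g 0
      = d.getD g 0 + ((l.map Prod.snd).flatten.count g : Int) := by
  induction l generalizing d with
  | nil => simp
  | cons p rest ih =>
    simp only [List.foldl_cons, ih, List.map_cons, List.flatten_cons, List.count_append,
      PySem.Dict.getD_foldl_insert_add_one]
    push_cast
    ring

-- over duplicate-free value sets, the flattened count of a gene counts the samples containing it
theorem flat_count (l : List (String × List String)) (hv : ∀ q ∈ l, q.2.Nodup) (g : String) :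
    (l.map Prod.snd).flatten.count g = l.countP (fun q => q.2.contains g) := by
  induction l with
  | nil => simp
  | cons q rest ih =>
    simp only [List.map_cons, List.flatten_cons, List.count_append, List.countP_cons]
    rw [ih (fun q hq => hv q (List.mem_cons_of_mem _ hq))]
    by_cases hm : g ∈ q.2
    · have h1 := List.nodup_iff_count_le_one.mp (hv q (List.mem_cons_self)) g
      have h2 := List.count_pos_iff.mpr hm
      simp [hm]
      omega
    · simp [List.count_eq_zero.mpr hm, hm]

-- with unique keys, "no OTHER sample contains g" is "exactly one sample contains g" (for g in p's set)
theorem pvUnique_iff (l : List (String × List String)) (hk : (l.map Prod.fst).Nodup)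
    (p : String × List String) (hp : p ∈ l) (g : String) (hg : g ∈ p.2) :
    (l.any (fun q => !(q.1 == p.1) && q.2.contains g) = false) ↔
      l.countP (fun q => q.2.contains g) = 1 := by
  obtain ⟨l1, l2, rfl⟩ := List.append_of_mem hp
  have hmap : ((l1 ++ p :: l2).map Prod.fst) = l1.map Prod.fst ++ p.1 :: l2.map Prod.fst := by simp
  rw [hmap, List.nodup_append] at hk
  have h1 : ∀ q ∈ l1, q.1 ≠ p.1 := fun q hq =>
    hk.2.2 q.1 (List.mem_map_of_mem (f := Prod.fst) hq) p.1 (List.mem_cons_self)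
  have h2 : ∀ q ∈ l2, q.1 ≠ p.1 := fun q hq he =>
    (List.nodup_cons.mp hk.2.1).1 (he ▸ List.mem_map_of_mem (f := Prod.fst) hq)
  rw [List.any_eq_false, List.countP_append, List.countP_cons]
  simp only [List.contains_eq_mem, hg, decide_true, if_pos]
  constructor
  · intro h
    have c1 : l1.countP (fun q => decide (g ∈ q.2)) = 0 := by
      rw [List.countP_eq_zero]
      intro q hq
      have := h q (List.mem_append_left _ hq)
      simpa [h1 q hq] using this
    have c2 : l2.countP (fun q => decide (g ∈ q.2)) = 0 := by
      rw [List.countP_eq_zero]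
      intro q hq
      have := h q (List.mem_append_right _ (List.mem_cons_of_mem _ hq))
      simpa [h2 q hq] using this
    omega
  · intro h q hq
    have c1 : l1.countP (fun q => decide (g ∈ q.2)) = 0 := by omega
    have c2 : l2.countP (fun q => decide (g ∈ q.2)) = 0 := by omega
    rcases List.mem_append.mp hq with hq1 | hq1
    · have := List.countP_eq_zero.mp c1 q hq1
      simp_all
    · rcases List.mem_cons.mp hq1 with rfl | hq2
      · simp
      · have := List.countP_eq_zero.mp c2 q hq2
        simp_all

-- ===== VERDICT (by name: the statement is the Claim_ definition above) =====
theorem unique_values_in_dict_sets_spec : Claim_equal_unique_values_in_dict_sets := by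
  intro l _ hpre
  obtain ⟨hk, hv⟩ := hpre
  unfold Spec_unique_values_in_dict_sets unique_values_in_dict_sets unique_values_in_dict_sets_alt
  simp only []
  rw [PySem.List.foldl_append_singleton_eq_map, List.nil_append]
  apply List.map_congr_left
  intro p hp
  simp only [Prod.mk.injEq]
  refine ⟨trivial, ?_⟩
  rw [pvLookup_self l p hk hp]
  -- gene by gene, the inner "notunique" scan is exactly the count-is-one test
  have hpoint : ∀ (acc : PySem.Set String), ∀ gene ∈ p.2,
      (if ((l.foldl (fun b q => if q.1 == p.1 then b
            else if (pvLookup l q.1).contains gene then true else b) false) == false)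
        then PySem.Set.add acc gene else acc)
      = (if ((l.foldl (fun d p => p.2.foldl (fun d g => d.insert g (d.getD g 0 + 1)) d)
            (PySem.Dict.empty : PySem.Dict String Int)).getD gene 0 == 1)
        then PySem.Set.add acc gene else acc) := by
    intro acc gene hgene
    have hbody : (l.foldl (fun b q => if q.1 == p.1 then b
          else if (pvLookup l q.1).contains gene then true else b) false)
        = l.any (fun q => !(q.1 == p.1) && q.2.contains gene) := by
      refine Eq.trans (PySem.List.foldl_congr_mem _ _
          (fun b q => if (!(q.1 == p.1) && q.2.contains gene) then true else b) _ ?_)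
          (by rw [PySem.List.foldl_if_true_eq, Bool.false_or])
      intro b q hq
      rw [pvLookup_self l q hk hq]
      by_cases h : q.1 = p.1 <;> simp [h]
    have hc : (l.foldl (fun d p => p.2.foldl (fun d g => d.insert g (d.getD g 0 + 1)) d)
          (PySem.Dict.empty : PySem.Dict String Int)).getD gene 0
        = ((l.map Prod.snd).flatten.count gene : Int) := by
      simpa using count_getD l PySem.Dict.empty gene
    have hAB : ((l.foldl (fun b q => if q.1 == p.1 then b
          else if (pvLookup l q.1).contains gene then true else b) false) == false)
        = ((l.foldl (fun d p => p.2.foldl (fun d g => d.insert g (d.getD g 0 + 1)) d)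
            (PySem.Dict.empty : PySem.Dict String Int)).getD gene 0 == 1) := by
      rw [hbody, Bool.eq_iff_iff]
      simp only [beq_iff_eq, hc, Nat.cast_eq_one, flat_count l hv gene]
      exact pvUnique_iff l hk p hp gene hgene
    rw [hAB]
  rw [PySem.List.foldl_congr_mem _ _ _ _ hpoint, PySem.List.foldl_if_eq_foldl_filter]
  rfl
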